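-- pv_equiv track=rewrite | github.com/jelni/Menel | Menel/utils/text_tools.py | plural_time
-- ===== SOURCE A (Python) =====
-- def plural(count: int, one: str, few: str, many: str) -> str:
--     if count == 1:
--         word = one
--     elif 10 <= count < 20:
--         word = many
--     else:
--         word = few if 1 < count % 10 < 5 else many
--     return f'{count:,} {word}'
--
-- def plural_time(seconds: int, /) -> str:
--     assert seconds > 0
--     output = []
--     while seconds > 0:
--         if seconds >= 3600:
--             output.append(plural(seconds // 3600, one='godzinę', few='godziny', many='godzin'))
--             seconds %= 3600
--         elif seconds >= 60:
--             output.append(plural(seconds // 60, one='minutę', few='minuty', many='minut'))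
--             seconds %= 60
--         else:
--             output.append(plural(seconds, one='sekundę', few='sekundy', many='sekund'))
--             break
--
--     if len(output) > 1:
--         return ' '.join(output[:-1]) + ' i ' + output[-1]
--     else:
--         return output[0]
-- ===== SOURCE B (Python) =====
-- PL_UNITS = (
--     (3600, 'godzinę', 'godziny', 'godzin'),
--     (60, 'minutę', 'minuty', 'minut'),
--     (1, 'sekundę', 'sekundy', 'sekund'),
-- )
--
--
-- def _polish_word(count: int, one: str, few: str, many: str) -> str:
--     if count == 1:
--         return one
--     if 10 <= count < 20:
--         return many
--     return few if 1 < count % 10 < 5 else many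
--
--
-- def _join_polish(parts: list) -> str:
--     if len(parts) == 1:
--         return parts[0]
--     if len(parts) == 2:
--         return parts[0] + ' i ' + parts[1]
--     return parts[0] + ' ' + _join_polish(parts[1:])
--
--
-- def plural_time(seconds: int, /) -> str:
--     assert seconds > 0
--     parts = []
--     for divisor, one, few, many in PL_UNITS:
--         count, seconds = divmod(seconds, divisor)
--         if count:
--             parts.append(f'{count:,} {_polish_word(count, one, few, many)}')
--     return _join_polish(parts)
-- ===== Notes on version B (the rewrite author's own statement) =====
-- stated objective: alternative
-- what changed: Replaces A's greedy mutating while-loop and its slice/join tail with a data-driven pass over a (divisor, word-forms) unit table that divmods the remaining seconds through each unit, plus a recursive ' '/' i ' joiner that consumes the parts list from the front; the plural word rule is kept as a word-only helper.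
import Mathlib
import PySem

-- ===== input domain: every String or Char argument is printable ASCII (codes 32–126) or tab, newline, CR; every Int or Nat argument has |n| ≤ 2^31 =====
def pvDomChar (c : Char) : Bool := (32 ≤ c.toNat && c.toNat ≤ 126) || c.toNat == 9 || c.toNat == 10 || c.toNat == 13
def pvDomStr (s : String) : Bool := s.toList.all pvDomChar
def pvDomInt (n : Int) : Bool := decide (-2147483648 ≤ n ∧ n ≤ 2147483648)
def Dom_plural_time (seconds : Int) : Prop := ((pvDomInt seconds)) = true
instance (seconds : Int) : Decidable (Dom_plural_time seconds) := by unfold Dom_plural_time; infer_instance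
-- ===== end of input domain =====

-- B replaces A's greedy mutating while-loop and slice/join tail by a data-driven pass over a
-- unit table plus a recursive ' '/' i ' joiner (objective: alternative decomposition).

-- shared helper: f'{n:,}' comma-grouped decimal, ported by hand (exact: groups of three
-- digits from the right, sign in front; both Pythons contain the identical f-string)
def pvGroup3 : List Char → List Char
  | a :: b :: c :: d :: rest => a :: b :: c :: ',' :: pvGroup3 (d :: rest)
  | l => l

def pvCommaFmt (n : Int) : List Char :=
  if n < 0 then '-' :: (pvGroup3 (PySem.Int.toChars (-n)).reverse).reverse
  else (pvGroup3 (PySem.Int.toChars n).reverse).reverse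

-- ===== PORT A =====
-- A's 'plural' helper (count word selection + f'{count:,} {word}')
def pvPlural (count : Int) (one few many : String) : String :=
  let word :=
    if count = 1 then one
    else if 10 ≤ count ∧ count < 20 then many
    else if 1 < PySem.Int.mod count 10 ∧ PySem.Int.mod count 10 < 5 then few
    else many
  String.ofList (pvCommaFmt count ++ ' ' :: word.toList)

-- the while-loop of A, state = (seconds, output)
def ptLoopA (seconds : Int) (output : List String) : List String :=
  if 0 < seconds then
    if 3600 ≤ seconds then
      ptLoopA (PySem.Int.mod seconds 3600)
        (output ++ [pvPlural (PySem.Int.floordiv seconds 3600) "godzinę" "godziny" "godzin"])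
    else if 60 ≤ seconds then
      ptLoopA (PySem.Int.mod seconds 60)
        (output ++ [pvPlural (PySem.Int.floordiv seconds 60) "minutę" "minuty" "minut"])
    else output ++ [pvPlural seconds "sekundę" "sekundy" "sekund"]
  else output
termination_by seconds.toNat
decreasing_by
  · have h1 : PySem.Int.mod seconds 3600 = seconds % 3600 :=
      PySem.Int.mod_eq_emod_of_pos (by omega)
    omega
  · have h1 : PySem.Int.mod seconds 60 = seconds % 60 :=
      PySem.Int.mod_eq_emod_of_pos (by omega)
    omega

def plural_time (seconds : Int) : String :=
  let output := ptLoopA seconds []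
  if 1 < output.length then
    String.ofList ((PySem.Str.join " " (PySem.List.slice output none (some (-1)))).toList
      ++ ' ' :: 'i' :: ' ' :: ((PySem.List.pyGet? output (-1)).getD "").toList)
  else (PySem.List.pyGet? output 0).getD ""   -- output[0]; the list is nonempty on every input Pre_ admits

-- ===== PORT B =====
-- B's PL_UNITS table
def pvUnits : List (Int × String × String × String) :=
  [(3600, "godzinę", "godziny", "godzin"), (60, "minutę", "minuty", "minut"),
   (1, "sekundę", "sekundy", "sekund")]

-- B's _polish_word: the word only
def pvWord (count : Int) (one few many : String) : String :=
  if count = 1 then one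
  else if 10 ≤ count ∧ count < 20 then many
  else if 1 < PySem.Int.mod count 10 ∧ PySem.Int.mod count 10 < 5 then few
  else many

-- B's _join_polish; [] would raise IndexError in Python (unreachable under Pre_)
def pvJoinPolish : List String → String
  | [p] => p
  | [p, q] => String.ofList (p.toList ++ ' ' :: 'i' :: ' ' :: q.toList)
  | p :: rest => String.ofList (p.toList ++ ' ' :: (pvJoinPolish rest).toList)
  | [] => ""

-- B's for-loop over the unit table, state = (remaining seconds, parts)
def pvBLoop : List (Int × String × String × String) → Int → List String → List String
  | [], _, parts => parts
  | (d, one, few, many) :: rest, secs, parts =>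
      let count := PySem.Int.floordiv secs d
      let secs' := PySem.Int.mod secs d
      pvBLoop rest secs'
        (if count ≠ 0 then
          parts ++ [String.ofList (pvCommaFmt count ++ ' ' :: (pvWord count one few many).toList)]
         else parts)

def plural_time_alt (seconds : Int) : String :=
  pvJoinPolish (pvBLoop pvUnits seconds [])

-- ===== PRECONDITION & SPEC =====
-- A asserts seconds > 0 (and its output list would be empty otherwise): Pre_ is exactly that.
def Pre_plural_time (seconds : Int) : Prop := 0 < seconds
instance (seconds : Int) : Decidable (Pre_plural_time seconds) := by unfold Pre_plural_time; infer_instance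
def pvWitness_plural_time : Int := (3723)
def Spec_plural_time (seconds : Int) (out : String) : Prop := out = plural_time_alt seconds
instance (seconds : Int) (out : String) : Decidable (Spec_plural_time seconds out) := by unfold Spec_plural_time; infer_instance

-- ===== CLAIM (what is proved, stated in full; the proofs are below) =====
def Claim_equal_plural_time : Prop := ∀ (seconds : Int), Dom_plural_time seconds → Pre_plural_time seconds → Spec_plural_time seconds (plural_time seconds)

-- ===== LEMMAS AND PROOFS =====
-- A's 'plural' and B's f-string + word helper build the same string
theorem pvPlural_eq (c : Int) (o f m : String) :
    pvPlural c o f m = String.ofList (pvCommaFmt c ++ ' ' :: (pvWord c o f m).toList) := rfl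

theorem ptLoopA_small (r : Int) (out : List String) (h0 : 0 ≤ r) (h1 : r < 60) :
    ptLoopA r out = out ++ (if r ≠ 0 then [pvPlural r "sekundę" "sekundy" "sekund"] else []) := by
  rw [ptLoopA]
  split_ifs with hp <;> simp_all <;> omega

theorem ptLoopA_mid (r : Int) (out : List String) (h0 : 0 ≤ r) (h1 : r < 3600) :
    ptLoopA r out = out
      ++ (if PySem.Int.floordiv r 60 ≠ 0 then [pvPlural (PySem.Int.floordiv r 60) "minutę" "minuty" "minut"] else [])
      ++ (if PySem.Int.mod r 60 ≠ 0 then [pvPlural (PySem.Int.mod r 60) "sekundę" "sekundy" "sekund"] else []) := by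
  have hd : PySem.Int.floordiv r 60 = r / 60 := PySem.Int.floordiv_eq_ediv_of_pos (by omega)
  have hm : PySem.Int.mod r 60 = r % 60 := PySem.Int.mod_eq_emod_of_pos (by omega)
  by_cases h60 : 60 ≤ r
  · rw [ptLoopA]
    rw [if_pos (by omega), if_neg (by omega), if_pos h60]
    rw [ptLoopA_small (PySem.Int.mod r 60) _ (by omega) (by omega)]
    rw [if_pos (by omega : PySem.Int.floordiv r 60 ≠ 0)]
  · rw [ptLoopA_small r out h0 (by omega)]
    rw [if_neg (by omega : ¬ PySem.Int.floordiv r 60 ≠ 0)]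
    have : PySem.Int.mod r 60 = r := by omega
    rw [this]
    simp

theorem ptLoopA_top (seconds : Int) (hp : 0 < seconds) :
    ptLoopA seconds [] =
      (if PySem.Int.floordiv seconds 3600 ≠ 0 then [pvPlural (PySem.Int.floordiv seconds 3600) "godzinę" "godziny" "godzin"] else [])
      ++ (if PySem.Int.floordiv (PySem.Int.mod seconds 3600) 60 ≠ 0 then [pvPlural (PySem.Int.floordiv (PySem.Int.mod seconds 3600) 60) "minutę" "minuty" "minut"] else [])
      ++ (if PySem.Int.mod (PySem.Int.mod seconds 3600) 60 ≠ 0 then [pvPlural (PySem.Int.mod (PySem.Int.mod seconds 3600) 60) "sekundę" "sekundy" "sekund"] else []) := by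
  have hd : PySem.Int.floordiv seconds 3600 = seconds / 3600 := PySem.Int.floordiv_eq_ediv_of_pos (by omega)
  have hm : PySem.Int.mod seconds 3600 = seconds % 3600 := PySem.Int.mod_eq_emod_of_pos (by omega)
  by_cases h36 : 3600 ≤ seconds
  · rw [ptLoopA]
    rw [if_pos hp, if_pos h36]
    rw [ptLoopA_mid (PySem.Int.mod seconds 3600) _ (by omega) (by omega)]
    rw [if_pos (by omega : PySem.Int.floordiv seconds 3600 ≠ 0)]
    simp only [List.nil_append]
  · have hrem : PySem.Int.mod seconds 3600 = seconds := by omega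
    rw [hrem]
    rw [ptLoopA_mid seconds [] (by omega) (by omega)]
    rw [if_neg (by omega : ¬ PySem.Int.floordiv seconds 3600 ≠ 0)]

-- B's table loop yields the same parts list
theorem bloop_top (seconds : Int) :
    pvBLoop pvUnits seconds [] =
      (if PySem.Int.floordiv seconds 3600 ≠ 0 then [pvPlural (PySem.Int.floordiv seconds 3600) "godzinę" "godziny" "godzin"] else [])
      ++ (if PySem.Int.floordiv (PySem.Int.mod seconds 3600) 60 ≠ 0 then [pvPlural (PySem.Int.floordiv (PySem.Int.mod seconds 3600) 60) "minutę" "minuty" "minut"] else [])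
      ++ (if PySem.Int.mod (PySem.Int.mod seconds 3600) 60 ≠ 0 then [pvPlural (PySem.Int.mod (PySem.Int.mod seconds 3600) 60) "sekundę" "sekundy" "sekund"] else []) := by
  have h1 : PySem.Int.floordiv (PySem.Int.mod (PySem.Int.mod seconds 3600) 60) 1
      = PySem.Int.mod (PySem.Int.mod seconds 3600) 60 := by
    rw [PySem.Int.floordiv_eq_ediv_of_pos (by omega)]; omega
  simp only [pvUnits, pvBLoop, h1, ← pvPlural_eq]
  split_ifs <;> simp

-- the slice/join tail equals B's recursive joiner on each reachable list shape
theorem tail1 (a : String) :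
    (if 1 < ([a] : List String).length then
      String.ofList ((PySem.Str.join " " (PySem.List.slice [a] none (some (-1)))).toList
        ++ ' ' :: 'i' :: ' ' :: ((PySem.List.pyGet? [a] (-1)).getD "").toList)
    else (PySem.List.pyGet? [a] 0).getD "") = pvJoinPolish [a] := by
  simp [PySem.List.pyGet?, PySem.List.pyIdx?, pvJoinPolish]

theorem tail2 (a b : String) :
    (if 1 < ([a, b] : List String).length then
      String.ofList ((PySem.Str.join " " (PySem.List.slice [a, b] none (some (-1)))).toList
        ++ ' ' :: 'i' :: ' ' :: ((PySem.List.pyGet? [a, b] (-1)).getD "").toList)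
    else (PySem.List.pyGet? [a, b] 0).getD "") = pvJoinPolish [a, b] := by
  simp [PySem.List.slice, PySem.List.pyGet?, PySem.List.pyIdx?, PySem.Str.join,
    PySem.Chars.join, List.intercalate, pvJoinPolish]

theorem tail3 (a b c : String) :
    (if 1 < ([a, b, c] : List String).length then
      String.ofList ((PySem.Str.join " " (PySem.List.slice [a, b, c] none (some (-1)))).toList
        ++ ' ' :: 'i' :: ' ' :: ((PySem.List.pyGet? [a, b, c] (-1)).getD "").toList)
    else (PySem.List.pyGet? [a, b, c] 0).getD "") = pvJoinPolish [a, b, c] := by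
  simp [PySem.List.slice, PySem.List.pyGet?, PySem.List.pyIdx?, PySem.Str.join,
    PySem.Chars.join, List.intercalate, pvJoinPolish]

-- ===== VERDICT (by name: the statement is the Claim_ definition above) =====
theorem plural_time_spec : Claim_equal_plural_time := by
  intro seconds _ hpre
  unfold Spec_plural_time plural_time plural_time_alt
  rw [ptLoopA_top seconds hpre, bloop_top seconds]
  have hd : PySem.Int.floordiv seconds 3600 = seconds / 3600 := PySem.Int.floordiv_eq_ediv_of_pos (by omega)
  have hm : PySem.Int.mod seconds 3600 = seconds % 3600 := PySem.Int.mod_eq_emod_of_pos (by omega)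
  have hd2 : PySem.Int.floordiv (PySem.Int.mod seconds 3600) 60 = (seconds % 3600) / 60 := by
    rw [hm]; exact PySem.Int.floordiv_eq_ediv_of_pos (by omega)
  have hm2 : PySem.Int.mod (PySem.Int.mod seconds 3600) 60 = (seconds % 3600) % 60 := by
    rw [hm]; exact PySem.Int.mod_eq_emod_of_pos (by omega)
  set a := pvPlural (PySem.Int.floordiv seconds 3600) "godzinę" "godziny" "godzin" with ha
  set b := pvPlural (PySem.Int.floordiv (PySem.Int.mod seconds 3600) 60) "minutę" "minuty" "minut" with hb
  set c := pvPlural (PySem.Int.mod (PySem.Int.mod seconds 3600) 60) "sekundę" "sekundy" "sekund" with hc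
  by_cases hH : PySem.Int.floordiv seconds 3600 ≠ 0
  · by_cases hM : PySem.Int.floordiv (PySem.Int.mod seconds 3600) 60 ≠ 0
    · by_cases hS : PySem.Int.mod (PySem.Int.mod seconds 3600) 60 ≠ 0
      · rw [if_pos hH, if_pos hM, if_pos hS]
        exact tail3 a b c
      · rw [if_pos hH, if_pos hM, if_neg hS]
        simpa using tail2 a b
    · by_cases hS : PySem.Int.mod (PySem.Int.mod seconds 3600) 60 ≠ 0
      · rw [if_pos hH, if_neg hM, if_pos hS]
        simpa using tail2 a c
      · rw [if_pos hH, if_neg hM, if_neg hS]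
        simpa using tail1 a
  · by_cases hM : PySem.Int.floordiv (PySem.Int.mod seconds 3600) 60 ≠ 0
    · by_cases hS : PySem.Int.mod (PySem.Int.mod seconds 3600) 60 ≠ 0
      · rw [if_neg hH, if_pos hM, if_pos hS]
        simpa using tail2 b c
      · rw [if_neg hH, if_pos hM, if_neg hS]
        simpa using tail1 b
    · by_cases hS : PySem.Int.mod (PySem.Int.mod seconds 3600) 60 ≠ 0
      · rw [if_neg hH, if_neg hM, if_pos hS]
        simpa using tail1 c
      · exfalso
        have hp0 : 0 < seconds := hpre
        have e1 : seconds / 3600 = 0 := by rw [← hd]; exact not_not.mp hH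
        have e2 : (seconds % 3600) / 60 = 0 := by rw [← hd2]; exact not_not.mp hM
        have e3 : (seconds % 3600) % 60 = 0 := by rw [← hm2]; exact not_not.mp hS
        omega
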